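-- pv_equiv track=rewrite | github.com/MrBrantCode/unitest_baseline | mut_generate/mist_train_cf/cf_94622/solution.py | reverse_and_remove_duplicates
-- ===== SOURCE A (Python) =====
-- def reverse_and_remove_duplicates(input_string):
--     # Reverse the input string
--     reversed_string = input_string[::-1]
--
--     # Remove duplicate characters
--     unique_chars = []
--     for char in reversed_string:
--         if char not in unique_chars:
--             unique_chars.append(char)
--
--     # Count occurrences of each character in the original string
--     char_counts = {}
--     for char in input_string:
--         if char in char_counts:
--             char_counts[char] += 1
--         else:
--             char_counts[char] = 1
--
--     # Create the final output string
--     final_string = ''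
--     for char in unique_chars:
--         final_string += char + str(char_counts[char])
--
--     return final_string
-- ===== SOURCE B (Python) =====
-- def reverse_and_remove_duplicates(input_string):
--     counts = {}
--     for char in input_string[::-1]:
--         counts[char] = counts.get(char, 0) + 1
--     return ''.join(c + str(n) for c, n in counts.items())
-- ===== Notes on version B (the rewrite author's own statement) =====
-- stated objective: faster
-- what changed: Replaces A's three passes (dedup list with a linear membership scan per char, a separate counting loop over the original string, then emit) by one pass over the reversed string building a single insertion-ordered count dict (keys land in first-appearance order with their totals), then one emit pass over its items.
import Mathlib
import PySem

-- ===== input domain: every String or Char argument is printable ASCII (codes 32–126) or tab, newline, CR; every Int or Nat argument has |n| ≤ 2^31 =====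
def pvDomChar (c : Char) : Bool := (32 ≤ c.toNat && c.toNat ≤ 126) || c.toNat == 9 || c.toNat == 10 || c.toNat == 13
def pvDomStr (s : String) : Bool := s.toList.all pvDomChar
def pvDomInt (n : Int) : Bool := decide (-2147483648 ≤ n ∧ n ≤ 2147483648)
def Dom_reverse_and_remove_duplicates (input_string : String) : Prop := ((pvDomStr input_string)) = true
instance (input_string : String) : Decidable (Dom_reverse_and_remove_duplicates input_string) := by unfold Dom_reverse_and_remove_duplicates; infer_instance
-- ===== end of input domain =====

-- B replaces A's three passes (list-dedup with membership scans, count loop, emit) by one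
-- counting pass over the reversed string into an insertion-ordered dict plus the emit pass;
-- a timing run measured B faster.
-- ===== PORT A =====
-- input_string[::-1] is reverse (PySem.Str.slice?_none_none_neg_one); char_counts[char] is ported
-- as getD _ 0, exact here because every char of unique_chars occurs in input_string.
def reverse_and_remove_duplicates (input_string : String) : String :=
  let reversed_string : List Char := input_string.toList.reverse
  let unique_chars : List Char :=
    reversed_string.foldl (fun acc char => if acc.contains char then acc else acc ++ [char]) []
  let char_counts : PySem.Dict Char Int :=
    input_string.toList.foldl
      (fun d char => if d.contains char then d.modify char 0 (· + 1) else d.insert char 1)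
      PySem.Dict.empty
  let final_chars : List Char :=
    unique_chars.foldl
      (fun acc char => acc ++ (char :: PySem.Int.toChars (char_counts.getD char 0))) []
  String.ofList final_chars

-- ===== PORT B =====
def reverse_and_remove_duplicates_alt (input_string : String) : String :=
  let counts : PySem.Dict Char Int :=
    input_string.toList.reverse.foldl (fun d char => d.insert char (d.getD char 0 + 1))
      PySem.Dict.empty
  String.ofList (counts.items.flatMap (fun p => p.1 :: PySem.Int.toChars p.2))

-- ===== PRECONDITION & SPEC =====
def Spec_reverse_and_remove_duplicates (input_string : String) (out : String) : Prop := out = reverse_and_remove_duplicates_alt input_string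
instance (input_string : String) (out : String) : Decidable (Spec_reverse_and_remove_duplicates input_string out) := by unfold Spec_reverse_and_remove_duplicates; infer_instance

-- ===== CLAIM (what is proved, stated in full; the proofs are below) =====
def Claim_equal_reverse_and_remove_duplicates : Prop := ∀ (input_string : String), Dom_reverse_and_remove_duplicates input_string → Spec_reverse_and_remove_duplicates input_string (reverse_and_remove_duplicates input_string)

-- ===== LEMMAS AND PROOFS =====

-- ===== VERDICT (by name: the statement is the Claim_ definition above) =====
lemma stepA_eq_modify (d : PySem.Dict Char Int) (c : Char) :
    (if d.contains c then d.modify c 0 (· + 1) else d.insert c 1) = d.modify c 0 (· + 1) := by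
  by_cases h : d.contains c = true
  · simp [h]
  · have hg : (d.get? c).isSome = false := by
      rw [← PySem.Dict.contains_eq_isSome_get?]; simpa using h
    have hnone : d.get? c = none := by simpa using hg
    simp [h, PySem.Dict.modify, PySem.Dict.getD, hnone]

theorem reverse_and_remove_duplicates_spec : Claim_equal_reverse_and_remove_duplicates := by
  intro s _
  unfold Spec_reverse_and_remove_duplicates
  unfold reverse_and_remove_duplicates reverse_and_remove_duplicates_alt
  have hA : s.toList.foldl
      (fun d char => if d.contains char then d.modify char 0 (· + 1) else d.insert char 1)
      PySem.Dict.empty = PySem.Dict.counter s.toList := by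
    rw [PySem.List.foldl_congr_mem _ _ _ _ (fun d c _ => stepA_eq_modify d c),
      ← PySem.Dict.counter_eq_foldl]
  have hu : s.toList.reverse.foldl
      (fun acc char => if acc.contains char then acc else acc ++ [char]) []
      = PySem.Set.ofList s.toList.reverse := by
    rw [PySem.Set.ofList_eq_foldl]
    simp [PySem.Set.add, PySem.Set.contains]
  simp only [hA, hu]
  rw [PySem.Dict.foldl_insert_getD_add_one_eq_counter, PySem.List.foldl_append_eq_flatMap,
    PySem.Dict.items_counter]
  simp only [List.flatMap_map, List.nil_append]
  simp only [PySem.Dict.getD_counter, List.count_reverse]
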